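-- pv_equiv track=rewrite | github.com/Viethiep49/daily_stock_analysis | src/report_language.py | get_sentiment_label
-- ===== SOURCE A (Python) =====
-- from typing import Any, Dict, Optional
--
-- SUPPORTED_REPORT_LANGUAGES = ("vi", "en", "zh")
--
-- _REPORT_LANGUAGE_ALIASES = {
--     # Vietnamese
--     "vietnamese": "vi",
--     "viet": "vi",
--     "vn": "vi",
--     # English
--     "english": "en",
--     "en-us": "en",
--     "en_us": "en",
--     "en-gb": "en",
--     "en_gb": "en",
--     # Chinese (kept for backward compat with stored data)
--     "zh-cn": "zh",
--     "zh_cn": "zh",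
--     "zh-hans": "zh",
--     "zh_hans": "zh",
--     "zh-tw": "zh",
--     "zh_tw": "zh",
--     "cn": "zh",
--     "chinese": "zh",
-- }
--
-- def normalize_report_language(value: Optional[str], default: str = "vi") -> str:
--     """Normalize report language to a supported short code. Default is 'vi'."""
--     candidate = (value or default).strip().lower().replace(" ", "_")
--     candidate = _REPORT_LANGUAGE_ALIASES.get(candidate, candidate)
--     if candidate in SUPPORTED_REPORT_LANGUAGES:
--         return candidate
--     return default
--
-- def get_sentiment_label(score: int, language: Optional[str]) -> str:
--     """Return localized sentiment label by score band."""
--     normalized = normalize_report_language(language)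
--
--     bands_vi = [(80, "Rất Lạc Quan"), (60, "Lạc Quan"), (40, "Trung Lập"), (20, "Bi Quan")]
--     bands_en = [(80, "Very Bullish"), (60, "Bullish"), (40, "Neutral"), (20, "Bearish")]
--     bands_zh = [(80, "极度乐观"), (60, "乐观"), (40, "中性"), (20, "悲观")]
--
--     bands = {"vi": bands_vi, "en": bands_en, "zh": bands_zh}.get(normalized, bands_vi)
--     for threshold, label in bands:
--         if score >= threshold:
--             return label
--     return {"vi": "Rất Bi Quan", "en": "Very Bearish", "zh": "极度悲观"}.get(normalized, "Rất Bi Quan")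
-- ===== SOURCE B (Python) =====
-- from typing import Optional
--
-- SUPPORTED_REPORT_LANGUAGES = ("vi", "en", "zh")
--
-- _REPORT_LANGUAGE_ALIASES = {
--     "vietnamese": "vi", "viet": "vi", "vn": "vi",
--     "english": "en", "en-us": "en", "en_us": "en", "en-gb": "en", "en_gb": "en",
--     "zh-cn": "zh", "zh_cn": "zh", "zh-hans": "zh", "zh_hans": "zh",
--     "zh-tw": "zh", "zh_tw": "zh", "cn": "zh", "chinese": "zh",
-- }
--
-- def normalize_report_language(value: Optional[str], default: str = "vi") -> str:
--     candidate = (value or default).strip().lower().replace(" ", "_")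
--     candidate = _REPORT_LANGUAGE_ALIASES.get(candidate, candidate)
--     if candidate in SUPPORTED_REPORT_LANGUAGES:
--         return candidate
--     return default
--
-- _SENTIMENT_LABELS = {
--     "vi": ["Rất Lạc Quan", "Lạc Quan", "Trung Lập", "Bi Quan", "Rất Bi Quan"],
--     "en": ["Very Bullish", "Bullish", "Neutral", "Bearish", "Very Bearish"],
--     "zh": ["极度乐观", "乐观", "中性", "悲观", "极度悲观"],
-- }
--
-- def get_sentiment_label(score: int, language: Optional[str]) -> str:
--     """Return localized sentiment label by score band (closed-form band index)."""
--     normalized = normalize_report_language(language)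
--     idx = max(0, min(4, 4 - score // 20))
--     return _SENTIMENT_LABELS.get(normalized, _SENTIMENT_LABELS["vi"])[idx]
-- ===== Notes on version B (the rewrite author's own statement) =====
-- stated objective: simpler
-- what changed: Replaces the per-language threshold lists and the threshold-scanning loop with one label table per language and a closed-form band index idx = max(0, min(4, 4 - score // 20)) exploiting the uniform 20-point bands.
import Mathlib
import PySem

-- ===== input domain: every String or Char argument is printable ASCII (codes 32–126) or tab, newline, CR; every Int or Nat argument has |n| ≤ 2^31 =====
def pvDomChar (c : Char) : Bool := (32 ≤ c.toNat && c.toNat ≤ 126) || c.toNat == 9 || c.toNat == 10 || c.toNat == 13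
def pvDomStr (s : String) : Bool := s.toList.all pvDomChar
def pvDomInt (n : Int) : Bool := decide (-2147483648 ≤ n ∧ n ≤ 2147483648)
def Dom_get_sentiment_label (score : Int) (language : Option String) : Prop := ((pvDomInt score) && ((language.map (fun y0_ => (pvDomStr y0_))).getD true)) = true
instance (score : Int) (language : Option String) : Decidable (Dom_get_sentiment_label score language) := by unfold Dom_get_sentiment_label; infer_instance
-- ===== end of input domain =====

-- B replaces A's threshold-scanning loop over per-language band lists with a single
-- 5-label table per language and a closed-form clamped band index (objective: simpler).



-- ===== PORT A =====
-- shared same-module helper normalize_report_language (used verbatim by both A and B)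
def pvAliases : PySem.Dict String String := PySem.Dict.ofList
  [("vietnamese", "vi"), ("viet", "vi"), ("vn", "vi"),
   ("english", "en"), ("en-us", "en"), ("en_us", "en"), ("en-gb", "en"), ("en_gb", "en"),
   ("zh-cn", "zh"), ("zh_cn", "zh"), ("zh-hans", "zh"), ("zh_hans", "zh"),
   ("zh-tw", "zh"), ("zh_tw", "zh"), ("cn", "zh"), ("chinese", "zh")]

def pvNormalize (value : Option String) : String :=
  -- (value or default): None and "" are falsy in Python
  let base : String := match value with
    | none => "vi"
    | some s => if s == "" then "vi" else s
  let candidate := PySem.Str.replace (PySem.Str.lower (PySem.Str.strip base)) " " "_"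
  let candidate := pvAliases.getD candidate candidate
  if ["vi", "en", "zh"].contains candidate then candidate else "vi"

-- the 'for threshold, label in bands' loop with early return
def pvBandLoop (bands : List (Int × String)) (score : Int) (dflt : String) : String :=
  match bands with
  | [] => dflt
  | (t, l) :: rest => if score ≥ t then l else pvBandLoop rest score dflt

def get_sentiment_label (score : Int) (language : Option String) : String :=
  let normalized := pvNormalize language
  let bands_vi : List (Int × String) := [(80, "Rất Lạc Quan"), (60, "Lạc Quan"), (40, "Trung Lập"), (20, "Bi Quan")]
  let bands_en : List (Int × String) := [(80, "Very Bullish"), (60, "Bullish"), (40, "Neutral"), (20, "Bearish")]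
  let bands_zh : List (Int × String) := [(80, "极度乐观"), (60, "乐观"), (40, "中性"), (20, "悲观")]
  let bands := (PySem.Dict.ofList [("vi", bands_vi), ("en", bands_en), ("zh", bands_zh)]).getD normalized bands_vi
  pvBandLoop bands score
    ((PySem.Dict.ofList [("vi", "Rất Bi Quan"), ("en", "Very Bearish"), ("zh", "极度悲观")]).getD normalized "Rất Bi Quan")

-- ===== PORT B =====
def pvSentimentLabels : PySem.Dict String (List String) := PySem.Dict.ofList
  [("vi", ["Rất Lạc Quan", "Lạc Quan", "Trung Lập", "Bi Quan", "Rất Bi Quan"]),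
   ("en", ["Very Bullish", "Bullish", "Neutral", "Bearish", "Very Bearish"]),
   ("zh", ["极度乐观", "乐观", "中性", "悲观", "极度悲观"])]

def get_sentiment_label_alt (score : Int) (language : Option String) : String :=
  let normalized := pvNormalize language
  let idx : Int := max 0 (min 4 (4 - PySem.Int.floordiv score 20))
  -- labels[idx]: idx is clamped to 0..4 so the Python indexing never raises
  (PySem.List.pyGet? (pvSentimentLabels.getD normalized (pvSentimentLabels.getD "vi" [])) idx).getD ""

-- ===== PRECONDITION & SPEC =====
def Spec_get_sentiment_label (score : Int) (language : Option String) (out : String) : Prop := out = get_sentiment_label_alt score language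
instance (score : Int) (language : Option String) (out : String) : Decidable (Spec_get_sentiment_label score language out) := by unfold Spec_get_sentiment_label; infer_instance

-- ===== CLAIM (what is proved, stated in full; the proofs are below) =====
def Claim_equal_get_sentiment_label : Prop := ∀ (score : Int) (language : Option String), Dom_get_sentiment_label score language → Spec_get_sentiment_label score language (get_sentiment_label score language)

-- ===== LEMMAS AND PROOFS =====

-- membership in the supported tuple forces one of the three codes
theorem pvPick_cases (c : String) :
    (if (["vi", "en", "zh"] : List String).contains c then c else "vi") = "vi" ∨
    (if (["vi", "en", "zh"] : List String).contains c then c else "vi") = "en" ∨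
    (if (["vi", "en", "zh"] : List String).contains c then c else "vi") = "zh" := by
  by_cases h : (["vi", "en", "zh"] : List String).contains c
  · rw [if_pos h]
    have hc : c = "vi" ∨ c = "en" ∨ c = "zh" := by
      simpa using h
    exact hc
  · rw [if_neg h]; left; rfl

-- normalize_report_language always lands in the supported set {"vi", "en", "zh"}
theorem pvNormalize_cases (v : Option String) :
    pvNormalize v = "vi" ∨ pvNormalize v = "en" ∨ pvNormalize v = "zh" := by
  unfold pvNormalize
  exact pvPick_cases _

-- A's 4-threshold scan equals B's clamped closed-form index into the 5-label table
theorem pvBand_eq (a b c d e : String) (score : Int) :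
    pvBandLoop [(80, a), (60, b), (40, c), (20, d)] score e
      = (PySem.List.pyGet? [a, b, c, d, e]
          (max 0 (min 4 (4 - PySem.Int.floordiv score 20)))).getD "" := by
  rw [PySem.Int.floordiv_eq_ediv_of_pos (by norm_num)]
  simp only [pvBandLoop]
  split_ifs with h1 h2 h3 h4
  · rw [show (max 0 (min 4 (4 - score / 20)) : Int) = 0 by omega]; rfl
  · rw [show (max 0 (min 4 (4 - score / 20)) : Int) = 1 by omega]; rfl
  · rw [show (max 0 (min 4 (4 - score / 20)) : Int) = 2 by omega]; rfl
  · rw [show (max 0 (min 4 (4 - score / 20)) : Int) = 3 by omega]; rfl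
  · rw [show (max 0 (min 4 (4 - score / 20)) : Int) = 4 by omega]; rfl

-- ===== VERDICT (by name: the statement is the Claim_ definition above) =====
theorem get_sentiment_label_spec : Claim_equal_get_sentiment_label := by
  intro score language _
  unfold Spec_get_sentiment_label get_sentiment_label get_sentiment_label_alt
  rcases pvNormalize_cases language with h | h | h <;> rw [h] <;>
    exact pvBand_eq _ _ _ _ _ score
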